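-- pv_equiv track=rewrite | github.com/porrasm/eldenring_subreddit_ooh_counter | text_analytics.py | get_ooh
-- ===== SOURCE A (Python) =====
-- def get_ooh(text):
--
--     l = len(text)
--     if l < 3:
--         return False
--
--     lw = text.lower()
--
--     upperCount = 0
--     lowerCount = 0
--     startOs = 0
--     endHs = 0
--     endLetters = 0
--
--     if lw[0] != 'o':
--         return None
--
--     # Start Os
--     i = 0
--     while i < l:
--         if lw[i] == 'o':
--             startOs += 1
--             if text[i].isupper():
--                 upperCount += 1
--             else:
--                 lowerCount += 1
--         else:
--             break
--         i += 1
--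
--     # End Hs
--     while i < l:
--         if lw[i] == 'h':
--             endHs += 1
--             if text[i].isupper():
--                 upperCount += 1
--             else:
--                 lowerCount += 1
--         elif lw[i] == 'o':
--             if text[i].isupper():
--                 upperCount += 1
--             else:
--                 lowerCount += 1
--         else:
--             break
--         i += 1
--
--     if i == l and upperCount > lowerCount:
--         return (startOs, endHs, lowerCount, upperCount)
--
--     while i < l:
--         if text[i].isalpha():
--             endLetters += 1
--         else:
--             break
--         i += 1
--
--     if endHs == 0 or endLetters > 0:
--         return None
--
--     if upperCount > lowerCount:
--         return (startOs, endHs, lowerCount, upperCount)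
--     else:
--         return None
-- ===== SOURCE B (Python) =====
-- def _prefix_len(pred, s):
--     """Length of the maximal leading run of characters of s satisfying pred."""
--     n = 0
--     for c in s:
--         if not pred(c):
--             break
--         n += 1
--     return n
--
--
-- def get_ooh(text):
--     # A returns False (not a tuple/None) for len < 3; that corner is outside Pre_.
--     if len(text) < 3:
--         return None
--     lw = text.lower()
--     if lw[0] != 'o':
--         return None
--     i = _prefix_len(lambda c: c == 'o' or c == 'h', lw)
--     startOs = _prefix_len(lambda c: c == 'o', lw)
--     rlw = lw[:i]
--     region = text[:i]
--     endHs = rlw.count('h')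
--     upperCount = sum(1 for c in region if c.isupper())
--     lowerCount = i - upperCount
--     res = (startOs, endHs, lowerCount, upperCount)
--     if i == len(text):
--         return res if upperCount > lowerCount else None
--     if endHs >= 1 and not text[i].isalpha() and upperCount > lowerCount:
--         return res
--     return None
-- ===== Notes on version B (the rewrite author's own statement) =====
-- stated objective: simpler
-- what changed: Replaces A's fused three-loop counter state machine (five counters threaded through interleaved while loops with mid-function returns) by one boundary scan for the o/h-run followed by deriving each counter independently from the region slice (prefix length, count('h'), sum of isupper, subtraction).
-- outside the precondition, e.g. on get_ooh('oo'): A returns False, B returns None; on get_ooh('h'): A returns False, B returns None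
import Mathlib
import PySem

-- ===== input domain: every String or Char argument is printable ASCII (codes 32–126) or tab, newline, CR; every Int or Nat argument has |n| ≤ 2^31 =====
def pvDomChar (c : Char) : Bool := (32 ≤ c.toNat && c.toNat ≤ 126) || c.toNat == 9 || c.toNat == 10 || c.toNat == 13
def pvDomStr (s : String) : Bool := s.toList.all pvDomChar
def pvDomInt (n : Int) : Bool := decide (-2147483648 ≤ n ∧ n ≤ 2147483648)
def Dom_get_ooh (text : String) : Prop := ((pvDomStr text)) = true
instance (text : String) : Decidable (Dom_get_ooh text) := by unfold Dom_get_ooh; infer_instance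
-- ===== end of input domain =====

-- B is a simpler decomposition: one boundary scan, then the four counters derived by
-- count/sum over the region slice instead of A's fused three-loop state machine.

-- ===== PORT A =====
-- A iterates over lw = text.lower() while testing text[i].isupper(); since str.lower is
-- character-wise (exact on ASCII), lw[i] = lowerChar text[i], so the loops recurse over
-- text's characters and lower each in place.

-- first while loop: leading 'o's, counting startOs and the case counters
def aLoop1 (cs : List Char) (startOs up low : Int) : Int × Int × Int × List Char :=
  match cs with
  | [] => (startOs, up, low, [])
  | c :: rest =>
    if PySem.Chars.lowerChar c = 'o' then
      if PySem.Chars.isupper c then aLoop1 rest (startOs + 1) (up + 1) low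
      else aLoop1 rest (startOs + 1) up (low + 1)
    else (startOs, up, low, c :: rest)

-- second while loop: 'h' or 'o' characters, counting endHs and the case counters
def aLoop2 (cs : List Char) (endHs up low : Int) : Int × Int × Int × List Char :=
  match cs with
  | [] => (endHs, up, low, [])
  | c :: rest =>
    if PySem.Chars.lowerChar c = 'h' then
      if PySem.Chars.isupper c then aLoop2 rest (endHs + 1) (up + 1) low
      else aLoop2 rest (endHs + 1) up (low + 1)
    else if PySem.Chars.lowerChar c = 'o' then
      if PySem.Chars.isupper c then aLoop2 rest endHs (up + 1) low
      else aLoop2 rest endHs up (low + 1)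
    else (endHs, up, low, c :: rest)

-- third while loop: count leading alphabetic characters
def aLoop3 (cs : List Char) (endLetters : Int) : Int :=
  match cs with
  | [] => endLetters
  | c :: rest => if PySem.Chars.isalpha c then aLoop3 rest (endLetters + 1) else endLetters

def get_ooh (text : String) : Option (Int × Int × Int × Int) :=
  let cs := text.toList
  let l := cs.length
  if l < 3 then none  -- Python returns False here (not a value of the result type); outside Pre_
  else
    let lw := PySem.Chars.lower cs
    match PySem.List.pyGet? lw 0 with
    | none => none  -- unreachable: l ≥ 3
    | some c0 =>
      if c0 ≠ 'o' then none
      else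
        match aLoop1 cs 0 0 0 with
        | (startOs, up1, low1, rest1) =>
          match aLoop2 rest1 0 up1 low1 with
          | (endHs, up, low, rest2) =>
            if rest2 = [] ∧ up > low then some (startOs, endHs, low, up)
            else
              let endLetters := aLoop3 rest2 0
              if endHs = 0 ∨ endLetters > 0 then none
              else if up > low then some (startOs, endHs, low, up)
              else none

-- ===== PORT B =====
-- Source B's _prefix_len(pred, s)
def bPrefixLen (p : Char → Bool) (s : List Char) : Nat :=
  match s with
  | [] => 0
  | c :: rest => if p c then bPrefixLen p rest + 1 else 0

def get_ooh_alt (text : String) : Option (Int × Int × Int × Int) :=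
  let cs := text.toList
  if cs.length < 3 then none
  else
    let lw := PySem.Chars.lower cs
    match lw with
    | [] => none  -- unreachable: lw has text's length ≥ 3
    | c0 :: _ =>
      if c0 ≠ 'o' then none
      else
        let i := bPrefixLen (fun c => c == 'o' || c == 'h') lw
        let startOs : Int := bPrefixLen (fun c => c == 'o') lw
        let rlw := lw.take i       -- lw[:i], 0 ≤ i ≤ len(lw)
        let region := cs.take i    -- text[:i]
        let endHs : Int := rlw.count 'h'
        let upperCount : Int := region.countP PySem.Chars.isupper
        let lowerCount : Int := (i : Int) - upperCount
        let res := (startOs, endHs, lowerCount, upperCount)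
        if i = cs.length then
          if upperCount > lowerCount then some res else none
        else
          match cs[i]? with
          | none => none  -- unreachable: i < len(cs)
          | some c =>
            if endHs ≥ 1 ∧ ¬ PySem.Chars.isalpha c ∧ upperCount > lowerCount then some res
            else none

-- ===== PRECONDITION & SPEC =====
-- Pre_ excludes only strings of length < 3, on which A returns the bool False — not a
-- value of the declared Optional-tuple result type.
def Pre_get_ooh (text : String) : Prop := 3 ≤ text.toList.length
instance (text : String) : Decidable (Pre_get_ooh text) := by unfold Pre_get_ooh; infer_instance
def pvWitness_get_ooh : String := "OOh"

def Spec_get_ooh (text : String) (out : Option (Int × Int × Int × Int)) : Prop := out = get_ooh_alt text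
instance (text : String) (out : Option (Int × Int × Int × Int)) : Decidable (Spec_get_ooh text out) := by unfold Spec_get_ooh; infer_instance

-- ===== CLAIM (what is proved, stated in full; the proofs are below) =====
def Claim_equal_get_ooh : Prop := ∀ (text : String), Dom_get_ooh text → Pre_get_ooh text → Spec_get_ooh text (get_ooh text)

-- ===== LEMMAS AND PROOFS =====

-- predicate abbreviations used only by the proofs
def oP (c : Char) : Bool := PySem.Chars.lowerChar c == 'o'
def hP (c : Char) : Bool := PySem.Chars.lowerChar c == 'h'
def ohP (c : Char) : Bool := oP c || hP c
def nupP (c : Char) : Bool := !PySem.Chars.isupper c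

theorem aLoop1_spec (cs : List Char) (s u v : Int) :
    aLoop1 cs s u v =
      (s + ((cs.takeWhile oP).length : Int),
       u + ((cs.takeWhile oP).countP PySem.Chars.isupper : Int),
       v + ((cs.takeWhile oP).countP nupP : Int),
       cs.dropWhile oP) := by
  induction cs generalizing s u v with
  | nil => simp [aLoop1]
  | cons c rest ih =>
    by_cases ho : PySem.Chars.lowerChar c = 'o'
    · by_cases hu : PySem.Chars.isupper c = true
      · simp [aLoop1, ho, hu, ih, oP, nupP]
        omega
      · simp [aLoop1, ho, hu, ih, oP, nupP]
        omega
    · simp [aLoop1, ho, oP]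

theorem aLoop2_spec (cs : List Char) (e u v : Int) :
    aLoop2 cs e u v =
      (e + ((cs.takeWhile ohP).countP hP : Int),
       u + ((cs.takeWhile ohP).countP PySem.Chars.isupper : Int),
       v + ((cs.takeWhile ohP).countP nupP : Int),
       cs.dropWhile ohP) := by
  induction cs generalizing e u v with
  | nil => simp [aLoop2]
  | cons c rest ih =>
    by_cases hh : PySem.Chars.lowerChar c = 'h'
    · by_cases hu : PySem.Chars.isupper c = true
      · simp [aLoop2, hh, hu, ih, oP, hP, ohP, nupP]; omega
      · simp [aLoop2, hh, hu, ih, oP, hP, ohP, nupP]; omega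
    · by_cases ho : PySem.Chars.lowerChar c = 'o'
      · by_cases hu : PySem.Chars.isupper c = true
        · simp [aLoop2, ho, hu, ih, oP, hP, ohP, nupP]; omega
        · simp [aLoop2, ho, hu, ih, oP, hP, ohP, nupP]; omega
      · simp [aLoop2, hh, ho, oP, hP, ohP]

theorem aLoop3_spec (cs : List Char) (e : Int) :
    aLoop3 cs e = e + ((cs.takeWhile PySem.Chars.isalpha).length : Int) := by
  induction cs generalizing e with
  | nil => simp [aLoop3]
  | cons c rest ih =>
    by_cases ha : PySem.Chars.isalpha c = true
    · simp [aLoop3, ha, ih]; omega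
    · simp [aLoop3, ha]

theorem bPrefixLen_eq (p : Char → Bool) (s : List Char) :
    bPrefixLen p s = (s.takeWhile p).length := by
  induction s with
  | nil => simp [bPrefixLen]
  | cons c rest ih =>
    by_cases hp : p c = true
    · simp [bPrefixLen, hp, ih]
    · simp [bPrefixLen, hp]

-- the oh-run splits as the o-run followed by the oh-run of the remainder
theorem takeWhile_oh_split (cs : List Char) :
    cs.takeWhile ohP = cs.takeWhile oP ++ (cs.dropWhile oP).takeWhile ohP := by
  induction cs with
  | nil => simp
  | cons c rest ih =>
    by_cases ho : oP c = true
    · have : ohP c = true := by simp [ohP, ho]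
      simp [ho, this, ih]
    · simp [ho]

theorem dropWhile_oh_split (cs : List Char) :
    cs.dropWhile ohP = (cs.dropWhile oP).dropWhile ohP := by
  induction cs with
  | nil => simp
  | cons c rest ih =>
    by_cases ho : oP c = true
    · have : ohP c = true := by simp [ohP, ho]
      simp [ho, this, ih]
    · simp [ho]

-- countP hP vanishes on the leading o-run
theorem countP_hP_takeWhile_oP (cs : List Char) : (cs.takeWhile oP).countP hP = 0 := by
  rw [List.countP_eq_zero]
  intro c hc
  have := List.mem_takeWhile_imp hc
  simp [oP] at this
  simp [hP, this]

theorem aStartOs (cs : List Char) : (aLoop1 cs 0 0 0).1 = ((cs.takeWhile oP).length : Int) := by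
  simp [aLoop1_spec]

theorem aPipe (cs : List Char) :
    aLoop2 (aLoop1 cs 0 0 0).2.2.2 0 (aLoop1 cs 0 0 0).2.1 (aLoop1 cs 0 0 0).2.2.1
      = (((cs.takeWhile ohP).countP hP : Int),
         ((cs.takeWhile ohP).countP PySem.Chars.isupper : Int),
         ((cs.takeWhile ohP).countP nupP : Int),
         cs.dropWhile ohP) := by
  simp only [aLoop1_spec, aLoop2_spec]
  rw [takeWhile_oh_split cs, dropWhile_oh_split cs]
  simp only [List.countP_append, countP_hP_takeWhile_oP, Prod.mk.injEq]
  refine ⟨by push_cast; omega, by push_cast; omega, by push_cast; omega, trivial⟩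

theorem b_take (cs : List Char) :
    List.take (List.takeWhile ohP cs).length cs = List.takeWhile ohP cs :=
  (List.prefix_iff_eq_take.1 (List.takeWhile_prefix _)).symm

theorem b_takeMap (cs : List Char) :
    List.take (List.takeWhile ohP cs).length (List.map PySem.Chars.lowerChar cs)
      = List.map PySem.Chars.lowerChar (List.takeWhile ohP cs) := by
  have h : List.takeWhile (fun c => c == 'o' || c == 'h') (List.map PySem.Chars.lowerChar cs)
      = List.map PySem.Chars.lowerChar (List.takeWhile ohP cs) := List.takeWhile_map
  have hlen : (List.takeWhile ohP cs).length
      = (List.takeWhile (fun c => c == 'o' || c == 'h') (List.map PySem.Chars.lowerChar cs)).length := by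
    rw [h, List.length_map]
  rw [hlen, ← List.prefix_iff_eq_take.1 (List.takeWhile_prefix _), h]

theorem b_count (cs : List Char) :
    List.count 'h' (List.map PySem.Chars.lowerChar (List.takeWhile ohP cs))
      = List.countP hP (List.takeWhile ohP cs) := by
  rw [List.count_eq_countP, List.countP_map]; rfl

theorem nupP_eq : (fun a => decide ¬ PySem.Chars.isupper a = true) = nupP := by
  funext c; cases h : PySem.Chars.isupper c <;> simp [nupP, h]

theorem get_ooh_spec : Claim_equal_get_ooh := by
  intro text _ hpre
  unfold Pre_get_ooh at hpre
  unfold Spec_get_ooh get_ooh get_ooh_alt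
  generalize hg : text.toList = cs at *
  clear hg
  cases cs with
  | nil => simp at hpre
  | cons a rest =>
    simp only [PySem.Chars.lower, List.map_cons]
    simp only [List.length_cons] at hpre
    have hlen : ¬ ((a :: rest).length < 3) := by simp only [List.length_cons]; omega
    rw [if_neg hlen, if_neg hlen]
    have hpg : PySem.List.pyGet? (PySem.Chars.lowerChar a :: List.map PySem.Chars.lowerChar rest) 0
        = some (PySem.Chars.lowerChar a) := by simp [PySem.List.pyGet?, PySem.List.pyIdx?]
    rw [hpg]
    simp only []
    by_cases hO : PySem.Chars.lowerChar a = 'o'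
    · rw [if_neg (show ¬ (PySem.Chars.lowerChar a ≠ 'o') by simp [hO]),
          if_neg (show ¬ (PySem.Chars.lowerChar a ≠ 'o') by simp [hO])]
      rw [← List.map_cons]
      rw [(by rw [bPrefixLen_eq, List.takeWhile_map, List.length_map]; rfl :
            bPrefixLen (fun c => c == 'o' || c == 'h') (List.map PySem.Chars.lowerChar (a :: rest))
              = (List.takeWhile ohP (a :: rest)).length)]
      rw [(by rw [bPrefixLen_eq, List.takeWhile_map, List.length_map]; rfl :
            bPrefixLen (fun c => c == 'o') (List.map PySem.Chars.lowerChar (a :: rest))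
              = (List.takeWhile oP (a :: rest)).length)]
      generalize (a :: rest) = cs
      rw [b_takeMap cs, b_count cs, b_take cs]
      simp only [aPipe, aStartOs]
      have hv : ((cs.takeWhile ohP).countP nupP : Int)
          = ((cs.takeWhile ohP).length : Int) - ((cs.takeWhile ohP).countP PySem.Chars.isupper : Int) := by
        have h := List.length_eq_countP_add_countP (l := cs.takeWhile ohP) PySem.Chars.isupper
        rw [nupP_eq] at h
        omega
      rw [hv]
      obtain ⟨R, D, hRD, hR, hD⟩ :
          ∃ R D, R ++ D = cs ∧ List.takeWhile ohP cs = R ∧ List.dropWhile ohP cs = D :=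
        ⟨_, _, List.takeWhile_append_dropWhile, rfl, rfl⟩
      rw [hR, hD, ← hRD]
      cases D with
      | nil =>
        simp only [aLoop3, List.append_nil, true_and, gt_iff_lt,
          lt_self_iff_false, or_false]
        split_ifs <;> rfl
      | cons c t =>
        rw [if_neg (show ¬ ((c :: t : List Char) = [] ∧
              (R.countP PySem.Chars.isupper : Int) > (R.length : Int) - (R.countP PySem.Chars.isupper : Int))
            by simp)]
        rw [if_neg (show ¬ (R.length = (R ++ c :: t).length) by simp)]
        rw [show (R ++ c :: t)[R.length]? = some c by
          rw [List.getElem?_append_right (Nat.le_refl _)]; simp]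
        simp only []
        rw [aLoop3_spec]
        by_cases ha : PySem.Chars.isalpha c = true
        · rw [if_pos (Or.inr (by simp [ha]))]
          simp [ha]
        · have htw : List.takeWhile PySem.Chars.isalpha (c :: t) = [] := by
            simp [ha]
          rw [htw]
          simp only [List.length_nil, Nat.cast_zero, add_zero, gt_iff_lt,
            lt_self_iff_false, or_false]
          by_cases he : List.countP hP R = 0
          · simp [he, ha]
          · have he' : (1:Int) ≤ (List.countP hP R : Int) :=
              by exact_mod_cast Nat.one_le_iff_ne_zero.2 he
            have he2 : ¬ (((List.countP hP R : Nat) : Int) = 0) := by omega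
            simp [ha, he']
            intro hall
            exact absurd (List.countP_eq_zero.2 (by simpa using hall)) he
    · simp [hO]
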